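-- pv_equiv track=rewrite | github.com/SamiraHobi/IMPRODIL_Semester_Project | main.py | put_slangwords_in_list
-- ===== SOURCE A (Python) =====
-- def put_slangwords_in_list(tokenised_list: list, slang_lst: list) -> list:
--     """
--     Check if slang term occurs in corpus, if yes add every instance to c_lst.
--
--     :param tokenised_list: list of tokens of a corpus
--     :param slang_lst: list of slang terms saved a strings
--     """
--     c_lst = []
--     for slang in slang_lst:
--         # make all tokens case insensitive
--         slang = slang.casefold()
--         for token in tokenised_list:
--             token = token.casefold()
--             if slang == token:
--                 c_lst.append(token)
--     return c_lst
-- ===== SOURCE B (Python) =====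
-- def put_slangwords_in_list(tokenised_list: list, slang_lst: list) -> list:
--     """
--     Check if slang term occurs in corpus, if yes add every instance to c_lst.
--     Counts casefolded tokens once, then repeats each slang by its count.
--     """
--     counts = {}
--     for token in tokenised_list:
--         t = token.casefold()
--         counts[t] = counts.get(t, 0) + 1
--     c_lst = []
--     for slang in slang_lst:
--         s = slang.casefold()
--         c_lst.extend([s] * counts.get(s, 0))
--     return c_lst
-- ===== Notes on version B (the rewrite author's own statement) =====
-- stated objective: faster
-- what changed: B builds a dict of casefolded-token counts in one pass and emits each slang repeated by its count, replacing A's inner scan of the whole token list per slang.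
import Mathlib
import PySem

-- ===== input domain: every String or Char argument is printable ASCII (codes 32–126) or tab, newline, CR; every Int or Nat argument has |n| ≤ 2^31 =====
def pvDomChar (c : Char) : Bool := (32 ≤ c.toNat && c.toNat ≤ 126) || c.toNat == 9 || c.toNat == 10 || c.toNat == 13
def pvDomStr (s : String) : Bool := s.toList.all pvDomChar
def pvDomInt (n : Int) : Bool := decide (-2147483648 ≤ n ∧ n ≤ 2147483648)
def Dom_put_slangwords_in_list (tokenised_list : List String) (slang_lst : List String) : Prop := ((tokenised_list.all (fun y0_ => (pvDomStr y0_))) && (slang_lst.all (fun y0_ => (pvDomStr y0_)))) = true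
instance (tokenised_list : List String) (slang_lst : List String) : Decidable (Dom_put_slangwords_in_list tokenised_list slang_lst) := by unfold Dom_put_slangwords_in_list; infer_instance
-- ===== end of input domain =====

-- B replaces A's per-slang scan of the token list by a single counting pass over the
-- casefolded tokens followed by replicate-by-count per slang (asymptotically faster).


-- ===== PORT A =====
-- str.casefold is ported as PySem.Str.lower: exact on the ASCII domain.
def put_slangwords_in_list (tokenised_list : List String) (slang_lst : List String) : List String :=
  slang_lst.foldl (fun c_lst slang =>
    let s := PySem.Str.lower slang
    tokenised_list.foldl (fun c_lst token =>
      let t := PySem.Str.lower token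
      if s = t then c_lst ++ [t] else c_lst) c_lst) []

-- ===== PORT B =====
-- counts[t] = counts.get(t, 0) + 1 loop is PySem.Dict-based; casefold ported as lower (ASCII-exact).
def put_slangwords_in_list_alt (tokenised_list : List String) (slang_lst : List String) : List String :=
  let counts : PySem.Dict String Int :=
    tokenised_list.foldl (fun d token =>
      let t := PySem.Str.lower token
      d.insert t (d.getD t 0 + 1)) PySem.Dict.empty
  slang_lst.foldl (fun c_lst slang =>
    let s := PySem.Str.lower slang
    c_lst ++ List.replicate (counts.getD s 0).toNat s) []

-- ===== PRECONDITION & SPEC =====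
def Spec_put_slangwords_in_list (tokenised_list : List String) (slang_lst : List String) (out : List String) : Prop := out = put_slangwords_in_list_alt tokenised_list slang_lst
instance (tokenised_list : List String) (slang_lst : List String) (out : List String) : Decidable (Spec_put_slangwords_in_list tokenised_list slang_lst out) := by unfold Spec_put_slangwords_in_list; infer_instance

-- ===== CLAIM (what is proved, stated in full; the proofs are below) =====
def Claim_equal_put_slangwords_in_list : Prop := ∀ (tokenised_list : List String) (slang_lst : List String), Dom_put_slangwords_in_list tokenised_list slang_lst → Spec_put_slangwords_in_list tokenised_list slang_lst (put_slangwords_in_list tokenised_list slang_lst)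

-- ===== LEMMAS AND PROOFS =====

-- A's inner scan over the tokens appends exactly `count` copies of the casefolded slang.
theorem inner_scan_eq_replicate (s : String) (tok : List String) (c : List String) :
    tok.foldl (fun c_lst token =>
      let t := PySem.Str.lower token
      if s = t then c_lst ++ [t] else c_lst) c
    = c ++ List.replicate ((tok.map PySem.Str.lower).count s) s := by
  induction tok generalizing c with
  | nil => simp
  | cons x xs ih =>
    simp only [List.foldl_cons, List.map_cons, ih]
    by_cases h : s = PySem.Str.lower x
    · subst h
      simp [List.replicate_succ, List.append_assoc]
    · simp [h, Ne.symm h]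

theorem put_slangwords_in_list_spec : Claim_equal_put_slangwords_in_list := by
  intro tok sl _
  unfold Spec_put_slangwords_in_list put_slangwords_in_list put_slangwords_in_list_alt
  have hcount : ∀ s : String,
      ((tok.foldl (fun d token =>
          let t := PySem.Str.lower token
          d.insert t (d.getD t 0 + 1)) (PySem.Dict.empty : PySem.Dict String Int)).getD s 0).toNat
        = (tok.map PySem.Str.lower).count s := by
    intro s
    show ((List.foldl
        (fun d token => PySem.Dict.insert d (PySem.Str.lower token)
          (PySem.Dict.getD d (PySem.Str.lower token) 0 + 1))
        (PySem.Dict.empty : PySem.Dict String Int) tok).getD s 0).toNat = _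
    rw [← List.foldl_map (f := PySem.Str.lower) (g := fun d t => PySem.Dict.insert d t (PySem.Dict.getD d t 0 + 1))]
    rw [PySem.Dict.foldl_insert_getD_add_one_eq_counter, PySem.Dict.getD_counter]
    simp
  simp only [inner_scan_eq_replicate, hcount]
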